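-- pv_equiv track=rewrite | github.com/rajlath/rkl_codes | code-signal/array_previous_less.py | arrayPreviousLess
-- ===== SOURCE A (Python) =====
-- def arrayPreviousLess(a):
--     r = []
--     while a:
--         v = a.pop()
--         h = -1
--         for w in a:
--             if w < v:
--                 h = w
--         r = [h] + r
--     return r
-- ===== SOURCE B (Python) =====
-- def arrayPreviousLess(a):
--     st = []
--     r = []
--     for v in a:
--         while st and st[-1] >= v:
--             st.pop()
--         r.append(st[-1] if st else -1)
--         st.append(v)
--     return r
-- ===== Notes on version B (the rewrite author's own statement) =====
-- stated objective: faster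
-- what changed: replaces the quadratic pop-and-rescan loop with a single left-to-right pass keeping a monotonic strictly-increasing stack whose top is each element's nearest previous smaller value
import Mathlib
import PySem

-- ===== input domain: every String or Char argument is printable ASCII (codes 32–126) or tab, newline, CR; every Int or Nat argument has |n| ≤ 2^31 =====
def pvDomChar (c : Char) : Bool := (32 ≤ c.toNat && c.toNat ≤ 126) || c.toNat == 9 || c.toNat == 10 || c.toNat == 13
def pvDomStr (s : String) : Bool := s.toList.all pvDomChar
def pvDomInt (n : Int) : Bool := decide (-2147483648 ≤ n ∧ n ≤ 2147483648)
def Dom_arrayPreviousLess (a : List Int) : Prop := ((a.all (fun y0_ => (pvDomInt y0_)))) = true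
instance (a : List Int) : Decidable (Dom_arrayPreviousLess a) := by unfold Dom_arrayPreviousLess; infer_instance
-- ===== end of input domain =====

-- B replaces A's quadratic pop-last-and-rescan loop with a single pass using a monotonic
-- stack (objective: faster, asymptotic). Note: Python A empties its argument list in place
-- (a.pop()); the equivalence proved here is about the return value only, B does not mutate.

-- ===== PORT A =====
-- while a: v = a.pop(); h = -1; for w in a: if w < v: h = w; r = [h] + r
def aplLoop (a : List Int) (r : List Int) : List Int :=
  if ha : a = [] then r
  else
    let v := a.getLast ha
    let rest := a.dropLast
    let h := rest.foldl (fun acc w => if w < v then w else acc) (-1)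
    aplLoop rest (h :: r)
termination_by a.length
decreasing_by
  have := List.length_pos_of_ne_nil ha
  simp only [rest, List.length_dropLast]
  omega

def arrayPreviousLess (a : List Int) : List Int := aplLoop a []

-- ===== PORT B =====
-- while st and st[-1] >= v: st.pop()   (stack top = list head here)
def popGE (st : List Int) (v : Int) : List Int :=
  match st with
  | [] => []
  | t :: rest => if v ≤ t then popGE rest v else st

-- for v in a: pop; r.append(top or -1); push v   (r kept reversed, reversed at the end)
def arrayPreviousLess_alt (a : List Int) : List Int :=
  (a.foldl (fun (s : List Int × List Int) v =>
      let st := popGE s.1 v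
      (v :: st, (match st with | [] => (-1 : Int) | t :: _ => t) :: s.2))
    ([], [])).2.reverse

-- ===== PRECONDITION & SPEC =====
def Spec_arrayPreviousLess (a : List Int) (out : List Int) : Prop := out = arrayPreviousLess_alt a
instance (a : List Int) (out : List Int) : Decidable (Spec_arrayPreviousLess a out) := by unfold Spec_arrayPreviousLess; infer_instance

-- ===== CLAIM (what is proved, stated in full; the proofs are below) =====
def Claim_equal_arrayPreviousLess : Prop := ∀ (a : List Int), Dom_arrayPreviousLess a → Spec_arrayPreviousLess a (arrayPreviousLess a)

-- ===== LEMMAS AND PROOFS =====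

-- the value A computes for the element following prefix p
def sf (p : List Int) (v : Int) : Int := p.foldl (fun acc w => if w < v then w else acc) (-1)

def bstep : List Int × List Int → Int → List Int × List Int :=
  fun s v =>
    let st := popGE s.1 v
    (v :: st, (match st with | [] => (-1 : Int) | t :: _ => t) :: s.2)

theorem alt_eq_foldl (a : List Int) :
    arrayPreviousLess_alt a = (a.foldl bstep ([], [])).2.reverse := rfl

theorem popGE_popGE (st : List Int) (u v : Int) (h : v ≤ u) :
    popGE (popGE st u) v = popGE st v := by
  induction st with
  | nil => rfl
  | cons t rest ih =>
      by_cases hu : u ≤ t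
      · have hv : v ≤ t := le_trans h hu
        simp [popGE, hu, hv, ih]
      · have : ¬ u ≤ t := hu
        simp [popGE, this]

def Good (p st : List Int) : Prop :=
  ∀ v, sf p v = (match popGE st v with | [] => (-1 : Int) | t :: _ => t)

theorem sf_append (p : List Int) (u v : Int) :
    sf (p ++ [u]) v = if u < v then u else sf p v := by
  simp [sf, List.foldl_append]

theorem good_step (p st : List Int) (u : Int) (hg : Good p st) :
    Good (p ++ [u]) (u :: popGE st u) := by
  intro v
  rw [sf_append]
  by_cases hv : u < v
  · have : ¬ v ≤ u := by omega
    simp [hv, popGE, this]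
  · have hvu : v ≤ u := by omega
    simp only [popGE, if_pos hvu]
    rw [popGE_popGE st u v hvu]
    simp [hv, hg v]

theorem aplLoop_concat (p : List Int) (u : Int) (r : List Int) :
    aplLoop (p ++ [u]) r = aplLoop p (sf p u :: r) := by
  rw [aplLoop]
  simp [List.getLast_append, List.dropLast_concat, sf]

theorem aplLoop_shift (p : List Int) (r : List Int) :
    aplLoop p r = aplLoop p [] ++ r := by
  induction p using List.reverseRecOn generalizing r with
  | nil => simp [aplLoop]
  | append_singleton p u ih =>
      rw [aplLoop_concat, aplLoop_concat, ih, ih (sf p u :: [])]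
      simp

theorem A_concat (p : List Int) (u : Int) :
    arrayPreviousLess (p ++ [u]) = arrayPreviousLess p ++ [sf p u] := by
  unfold arrayPreviousLess
  rw [aplLoop_concat, aplLoop_shift]

theorem main_inv (a : List Int) :
    Good a (a.foldl bstep ([], [])).1 ∧
      (a.foldl bstep ([], [])).2.reverse = arrayPreviousLess a := by
  induction a using List.reverseRecOn with
  | nil =>
      constructor
      · intro v; simp [sf, popGE]
      · simp [arrayPreviousLess, aplLoop]
  | append_singleton p u ih =>
      obtain ⟨hg, hr⟩ := ih
      rw [List.foldl_append]
      constructor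
      · simpa [bstep] using good_step p _ u hg
      · rw [A_concat, ← hr]
        simp [bstep]
        rw [hg u]

-- ===== VERDICT (by name: the statement is the Claim_ definition above) =====
theorem arrayPreviousLess_spec : Claim_equal_arrayPreviousLess := by
  intro a _
  unfold Spec_arrayPreviousLess
  rw [alt_eq_foldl, (main_inv a).2]
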